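-- pv_equiv track=rewrite | github.com/yxtj/PIPO | security/count_queries.py | comp_shape_reverse
-- ===== SOURCE A (Python) =====
-- def comp_shape_reverse(model, c0=3):
--     c, h, w = 1, 1, 1
--     res=[(c, h, w)]
--     for i in range(len(model)-1, -1, -1):
--         k = model[i][1]
--         c = model[i-1][0] if i>0 else c0
--         h, w = h + k - 1, w + k - 1
--         res.append((c, h, w))
--     res.reverse()
--     return res
-- ===== SOURCE B (Python) =====
-- def comp_shape_reverse(model, c0=3):
--     # forward pass: precompute the total receptive-field size, then shrink it
--     h = 1 + sum(k - 1 for _, k in model)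
--     res = []
--     c = c0
--     for ch, k in model:
--         res.append((c, h, h))
--         h -= k - 1
--         c = ch
--     res.append((1, 1, 1))
--     return res
-- ===== Notes on version B (the rewrite author's own statement) =====
-- stated objective: simpler
-- what changed: B replaces A's backward index loop plus final reverse() with a single forward pass: it precomputes the total size 1+sum(k-1) once, then shrinks it while walking the layers, appending the base tuple last, so no indexing and no reversal.
import Mathlib
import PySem

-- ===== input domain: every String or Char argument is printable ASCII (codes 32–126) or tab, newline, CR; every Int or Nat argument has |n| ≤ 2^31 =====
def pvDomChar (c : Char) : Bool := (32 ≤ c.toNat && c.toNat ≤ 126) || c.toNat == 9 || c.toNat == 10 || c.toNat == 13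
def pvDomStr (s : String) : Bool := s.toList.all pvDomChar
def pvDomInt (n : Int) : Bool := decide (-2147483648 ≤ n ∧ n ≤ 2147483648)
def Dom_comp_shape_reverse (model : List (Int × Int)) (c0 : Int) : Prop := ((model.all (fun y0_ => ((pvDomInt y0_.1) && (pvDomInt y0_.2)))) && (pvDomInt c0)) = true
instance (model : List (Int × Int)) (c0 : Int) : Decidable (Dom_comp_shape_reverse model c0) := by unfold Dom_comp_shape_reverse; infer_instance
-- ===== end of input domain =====

-- B replaces A's backward index loop + reverse() with a single forward pass over the layers
-- (precomputed total, shrinking suffix sum, base tuple appended last): simpler, no indexing, no reversal.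


-- ===== PORT A =====
-- literal port of A: backward index loop over range(len(model)-1, -1, -1),
-- state (c, h, w, res); indices are always in range, so pyGetD's default never fires.
def comp_shape_reverse (model : List (Int × Int)) (c0 : Int) : List (Int × Int × Int) :=
  let st := (PySem.List.pyRange ((model.length : Int) - 1) (-1) (-1)).foldl
    (fun (st : Int × Int × Int × List (Int × Int × Int)) i =>
      let k := (PySem.List.pyGetD model i (0, 0)).2
      let c := if i > 0 then (PySem.List.pyGetD model (i - 1) (0, 0)).1 else c0
      let h := st.2.1 + k - 1
      let w := st.2.2.1 + k - 1
      (c, h, w, st.2.2.2 ++ [(c, h, w)]))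
    (1, 1, 1, [(1, 1, 1)])
  st.2.2.2.reverse

-- ===== PORT B =====
-- literal port of B: forward pass, h starts at 1 + sum(k-1), shrinks per layer; base tuple last.
def comp_shape_reverse_alt (model : List (Int × Int)) (c0 : Int) : List (Int × Int × Int) :=
  let h0 : Int := 1 + model.foldl (fun acc p => acc + (p.2 - 1)) 0
  let st := model.foldl
    (fun (st : Int × Int × List (Int × Int × Int)) p =>
      (p.1, st.2.1 - (p.2 - 1), st.2.2 ++ [(st.1, st.2.1, st.2.1)]))
    (c0, h0, [])
  st.2.2 ++ [(1, 1, 1)]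

-- ===== PRECONDITION & SPEC =====
def Spec_comp_shape_reverse (model : List (Int × Int)) (c0 : Int) (out : List (Int × Int × Int)) : Prop := out = comp_shape_reverse_alt model c0
instance (model : List (Int × Int)) (c0 : Int) (out : List (Int × Int × Int)) : Decidable (Spec_comp_shape_reverse model c0 out) := by unfold Spec_comp_shape_reverse; infer_instance

-- ===== CLAIM (what is proved, stated in full; the proofs are below) =====
def Claim_equal_comp_shape_reverse : Prop := ∀ (model : List (Int × Int)) (c0 : Int), Dom_comp_shape_reverse model c0 → Spec_comp_shape_reverse model c0 (comp_shape_reverse model c0)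

-- ===== LEMMAS AND PROOFS =====

-- A's loop body as a named function (proof helper only).
def pvStA (model : List (Int × Int)) (c0 : Int)
    (st : Int × Int × Int × List (Int × Int × Int)) (i : Int) :
    Int × Int × Int × List (Int × Int × Int) :=
  let k := (PySem.List.pyGetD model i (0, 0)).2
  let c := if i > 0 then (PySem.List.pyGetD model (i - 1) (0, 0)).1 else c0
  let h := st.2.1 + k - 1
  let w := st.2.2.1 + k - 1
  (c, h, w, st.2.2.2 ++ [(c, h, w)])

-- A's full loop state.
def pvFA (model : List (Int × Int)) (c0 : Int) : Int × Int × Int × List (Int × Int × Int) :=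
  (PySem.List.pyRange ((model.length : Int) - 1) (-1) (-1)).foldl (pvStA model c0) (1, 1, 1, [(1, 1, 1)])

theorem pvA_eq (model : List (Int × Int)) (c0 : Int) :
    comp_shape_reverse model c0 = (pvFA model c0).2.2.2.reverse := rfl

-- sum of (k-1) over the model (right fold)
def pvS (model : List (Int × Int)) : Int := model.foldr (fun p a => a + (p.2 - 1)) 0

theorem pvS_cons (p : Int × Int) (rest : List (Int × Int)) :
    pvS (p :: rest) = pvS rest + (p.2 - 1) := rfl

-- the list B's loop produces
def pvGo (c h : Int) (model : List (Int × Int)) : List (Int × Int × Int) :=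
  match model with
  | [] => []
  | p :: rest => (c, h, h) :: pvGo p.1 (h - (p.2 - 1)) rest

-- [n, n-1, ..., 0] = (map (+1) [n-1, ..., 0]) ++ [0]
theorem pvRange_shift (n : Nat) :
    PySem.List.pyRange (n : Int) (-1) (-1)
      = (PySem.List.pyRange ((n : Int) - 1) (-1) (-1)).map (· + 1) ++ [0] := by
  rw [PySem.List.pyRange_neg_one, PySem.List.pyRange_neg_one]
  have h1 : ((n : Int) - (-1)).toNat = n + 1 := by omega
  have h2 : ((n : Int) - 1 - (-1)).toNat = n := by omega
  rw [h1, h2, List.range_succ, List.map_append, List.map_map]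
  refine congrArg₂ (· ++ ·) ?_ ?_
  · apply List.map_congr_left
    intro k _
    simp only [Function.comp_apply]
    ring
  · simp

-- shifting the index by one turns A's step on p :: rest into A's step on rest with c0 := p.1
theorem pvStA_shift (p : Int × Int) (rest : List (Int × Int)) (c0 : Int)
    (st : Int × Int × Int × List (Int × Int × Int)) (i : Int) (hi : 0 ≤ i) :
    pvStA (p :: rest) c0 st (i + 1) = pvStA rest p.1 st i := by
  unfold pvStA
  have hk : (PySem.List.pyGetD (p :: rest) (i + 1) (0, 0)) = PySem.List.pyGetD rest i (0, 0) := by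
    obtain ⟨n, rfl⟩ := Int.eq_ofNat_of_zero_le hi
    simp [PySem.List.pyGetD, PySem.List.pyGet?_cons_succ]
  have hc : (if i + 1 > 0 then (PySem.List.pyGetD (p :: rest) (i + 1 - 1) (0, 0)).1 else c0)
      = (if i > 0 then (PySem.List.pyGetD rest (i - 1) (0, 0)).1 else p.1) := by
    rw [if_pos (by omega : i + 1 > 0)]
    rcases lt_or_eq_of_le hi with hpos | hzero
    · rw [if_pos hpos, show i + 1 - 1 = (i - 1) + 1 from by ring]
      obtain ⟨n, hn⟩ := Int.eq_ofNat_of_zero_le (by omega : (0 : Int) ≤ i - 1)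
      rw [hn]
      simp [PySem.List.pyGetD, PySem.List.pyGet?_cons_succ]
    · rw [if_neg (by omega), show i + 1 - 1 = i from by ring, ← hzero]
      simp [PySem.List.pyGetD_zero_cons]
  simp only [hk, hc]

-- A's fold on p :: rest = one extra step after A's fold on rest (with c0 := p.1)
theorem pvFA_cons (p : Int × Int) (rest : List (Int × Int)) (c0 : Int) :
    pvFA (p :: rest) c0 = pvStA (p :: rest) c0 (pvFA rest p.1) 0 := by
  unfold pvFA
  have hlen : (((p :: rest).length : Int) - 1) = (rest.length : Int) := by
    simp only [List.length_cons]
    push_cast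
    ring
  rw [hlen, pvRange_shift rest.length, List.foldl_append, List.foldl_map]
  simp only [List.foldl_cons, List.foldl_nil]
  congr 1
  apply PySem.List.foldl_congr_mem
  intro acc x hx
  have hx0 : (0 : Int) ≤ x := by
    have h := PySem.List.mem_pyRange_neg_one.mp hx
    omega
  exact pvStA_shift p rest c0 acc x hx0

-- h-component invariant of A's loop state
theorem pvFA_h (model : List (Int × Int)) (c0 : Int) :
    (pvFA model c0).2.1 = 1 + pvS model ∧ (pvFA model c0).2.2.1 = 1 + pvS model := by
  induction model generalizing c0 with
  | nil =>
      unfold pvFA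
      rw [show ((([] : List (Int × Int)).length : Int) - 1) = -1 from by simp,
        PySem.List.pyRange_neg_one_eq_nil (le_refl _)]
      exact ⟨rfl, rfl⟩
  | cons p rest ih =>
      rw [pvFA_cons]
      obtain ⟨h1, h2⟩ := ih p.1
      unfold pvStA
      simp only [PySem.List.pyGetD_zero_cons, h1, h2, pvS_cons]
      exact ⟨by ring, by ring⟩

-- reversed accumulated output of A's loop = B's forward list + base tuple
theorem pvFA_res (model : List (Int × Int)) (c0 : Int) :
    (pvFA model c0).2.2.2.reverse = pvGo c0 (1 + pvS model) model ++ [(1, 1, 1)] := by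
  induction model generalizing c0 with
  | nil =>
      unfold pvFA
      rw [show ((([] : List (Int × Int)).length : Int) - 1) = -1 from by simp,
        PySem.List.pyRange_neg_one_eq_nil (le_refl _)]
      rfl
  | cons p rest ih =>
      rw [pvFA_cons]
      obtain ⟨h1, h2⟩ := pvFA_h rest p.1
      unfold pvStA
      simp only [PySem.List.pyGetD_zero_cons, h1, h2]
      rw [if_neg (by norm_num : ¬ ((0 : Int) > 0))]
      have e1 : 1 + pvS rest + p.2 - 1 = 1 + pvS (p :: rest) := by rw [pvS_cons]; ring
      have e2 : 1 + pvS (p :: rest) - (p.2 - 1) = 1 + pvS rest := by rw [pvS_cons]; ring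
      rw [show pvGo c0 (1 + pvS (p :: rest)) (p :: rest)
            = (c0, 1 + pvS (p :: rest), 1 + pvS (p :: rest))
              :: pvGo p.1 (1 + pvS (p :: rest) - (p.2 - 1)) rest from rfl, e2]
      rw [List.reverse_append, List.reverse_cons, List.reverse_nil, List.nil_append,
        List.singleton_append, ih p.1, e1, List.cons_append]

-- B's fold accumulates exactly pvGo
theorem pvB_fold (model : List (Int × Int)) (c h : Int) (res : List (Int × Int × Int)) :
    (model.foldl
      (fun (st : Int × Int × List (Int × Int × Int)) p =>
        (p.1, st.2.1 - (p.2 - 1), st.2.2 ++ [(st.1, st.2.1, st.2.1)]))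
      (c, h, res)).2.2 = res ++ pvGo c h model := by
  induction model generalizing c h res with
  | nil => simp [pvGo]
  | cons p rest ih =>
      simp only [List.foldl_cons, pvGo]
      rw [ih]
      simp

-- B's precomputed sum equals pvS
theorem pvB_sum (model : List (Int × Int)) (a : Int) :
    model.foldl (fun acc p => acc + (p.2 - 1)) a = a + pvS model := by
  induction model generalizing a with
  | nil => simp [pvS]
  | cons p rest ih =>
      simp only [List.foldl_cons]
      rw [ih, pvS_cons]
      ring

theorem pvB_eq (model : List (Int × Int)) (c0 : Int) :
    comp_shape_reverse_alt model c0 = pvGo c0 (1 + pvS model) model ++ [(1, 1, 1)] := by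
  have h : comp_shape_reverse_alt model c0
      = (model.foldl
          (fun (st : Int × Int × List (Int × Int × Int)) p =>
            (p.1, st.2.1 - (p.2 - 1), st.2.2 ++ [(st.1, st.2.1, st.2.1)]))
          (c0, 1 + model.foldl (fun acc p => acc + (p.2 - 1)) 0, [])).2.2 ++ [(1, 1, 1)] := rfl
  rw [h, pvB_sum model 0, pvB_fold]
  simp

-- ===== VERDICT (by name: the statement is the Claim_ definition above) =====
theorem comp_shape_reverse_spec : Claim_equal_comp_shape_reverse := by
  intro model c0 _
  unfold Spec_comp_shape_reverse
  rw [pvA_eq, pvFA_res, pvB_eq]
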